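-- pv_equiv track=rewrite | github.com/MathMargarita/Bioinformatics-Rosalind | Python1/BA3K.py | non1to1
-- ===== SOURCE A (Python) =====
-- def non1to1(graph):
--     unbalancedNodes=[]
--     for key in graph.keys():
--         inputDeg=0
--         for key2 in graph.keys():
--             if key2!=key:
--                 for node in graph[key2]:
--                     if node==key:
--                         inputDeg=inputDeg+1
--         if(inputDeg!=1 or len(graph[key])!=1):
--             unbalancedNodes.append(key)
--     return unbalancedNodes
-- ===== SOURCE B (Python) =====
-- def non1to1(graph):
--     indeg = {}
--     for src, targets in graph.items():
--         for t in targets: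
--             if t != src:
--                 indeg[t] = indeg.get(t, 0) + 1
--     return [k for k, v in graph.items() if indeg.get(k, 0) != 1 or len(v) != 1]
-- ===== Notes on version B (the rewrite author's own statement) =====
-- stated objective: faster
-- what changed: Replaces A's per-node rescan of every adjacency list (O(V*E)) by one pass that builds an in-degree dictionary skipping self-loop edges, then a single comprehension over the items.
import Mathlib
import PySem

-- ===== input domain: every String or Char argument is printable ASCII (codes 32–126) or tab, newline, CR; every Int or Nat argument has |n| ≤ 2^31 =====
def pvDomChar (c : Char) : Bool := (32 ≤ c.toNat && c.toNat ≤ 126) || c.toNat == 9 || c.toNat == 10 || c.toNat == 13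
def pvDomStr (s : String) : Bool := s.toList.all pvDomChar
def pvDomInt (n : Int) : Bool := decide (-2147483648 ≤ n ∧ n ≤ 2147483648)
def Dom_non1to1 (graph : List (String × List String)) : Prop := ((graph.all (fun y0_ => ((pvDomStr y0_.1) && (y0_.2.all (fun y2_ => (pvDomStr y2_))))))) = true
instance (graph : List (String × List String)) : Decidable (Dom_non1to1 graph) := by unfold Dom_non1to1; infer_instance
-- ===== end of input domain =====

-- B replaces A's per-key rescan of every adjacency list by one pass over the edges that
-- builds an in-degree dictionary (skipping self-loop edges), then one pass over the items
-- (objective: faster).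

-- ===== PORT A =====
-- graph[k]: k is always a key of the dict here, so getD's default [] is never used.
def non1to1 (graph : List (String × List String)) : List String :=
  (graph.map Prod.fst).foldl (fun unbalancedNodes key =>
    let inputDeg : Int :=
      (graph.map Prod.fst).foldl (fun d key2 =>
        if key2 != key then
          ((PySem.Dict.mk graph).getD key2 []).foldl
            (fun d node => if node == key then d + 1 else d) d
        else d) 0
    if inputDeg != 1 || ((PySem.Dict.mk graph).getD key []).length != 1 then
      unbalancedNodes ++ [key]
    else unbalancedNodes) []

-- ===== PORT B =====
def non1to1_alt (graph : List (String × List String)) : List String :=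
  let indeg : PySem.Dict String Int :=
    graph.foldl (fun d p =>
      p.2.foldl (fun d t => if t != p.1 then d.insert t (d.getD t 0 + 1) else d) d)
      PySem.Dict.empty
  (graph.filter (fun p => indeg.getD p.1 0 != 1 || p.2.length != 1)).map Prod.fst

-- ===== PRECONDITION & SPEC =====
-- Pre_ excludes association lists with duplicate keys: a Python dict has unique keys,
-- so such lists are not the association-list image of any dict input.
def Pre_non1to1 (graph : List (String × List String)) : Prop := (graph.map Prod.fst).Nodup
instance (graph : List (String × List String)) : Decidable (Pre_non1to1 graph) := by
  unfold Pre_non1to1; infer_instance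
def pvWitness_non1to1 : (List (String × List String)) := [("a", ["b"]), ("b", ["a"])]

def Spec_non1to1 (graph : List (String × List String)) (out : List String) : Prop := out = non1to1_alt graph
instance (graph : List (String × List String)) (out : List String) : Decidable (Spec_non1to1 graph out) := by unfold Spec_non1to1; infer_instance

-- ===== CLAIM (what is proved, stated in full; the proofs are below) =====
def Claim_equal_non1to1 : Prop := ∀ (graph : List (String × List String)), Dom_non1to1 graph → Pre_non1to1 graph → Spec_non1to1 graph (non1to1 graph)

-- ===== LEMMAS AND PROOFS =====

-- one adjacency list's contribution (B's inner loop) to the in-degree of `key`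
lemma indeg_inner (key src : String) (ts : List String) (d : PySem.Dict String Int) :
    (ts.foldl (fun d t => if t != src then d.insert t (d.getD t 0 + 1) else d) d).getD key 0
      = d.getD key 0 + (if key = src then 0 else (ts.count key : Int)) := by
  rw [PySem.List.foldl_if_eq_foldl_filter, PySem.Dict.getD_foldl_insert_add_one]
  congr 1
  by_cases h : key = src
  · subst h; simp [List.count_eq_zero]
  · rw [if_neg h]; norm_cast; exact List.count_filter (by simp [h])

-- B's edge pass: the in-degree dictionary counts, per pair, the non-self occurrences of `key`
lemma indeg_outer (key : String) (l : List (String × List String)) (d : PySem.Dict String Int) :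
    (l.foldl (fun d p =>
        p.2.foldl (fun d t => if t != p.1 then d.insert t (d.getD t 0 + 1) else d) d) d).getD key 0
      = d.getD key 0 + (l.map (fun p => if key = p.1 then 0 else (p.2.count key : Int))).sum := by
  induction l generalizing d with
  | nil => simp
  | cons p l ih => rw [List.foldl_cons, ih, indeg_inner]; simp; ring

-- A's inner double loop computes the same per-key sum via lookups
lemma cntA_eq (key : String) (l : List String) (graph : List (String × List String)) (d : Int) :
    l.foldl (fun d key2 =>
        if key2 != key then
          ((PySem.Dict.mk graph).getD key2 []).foldl
            (fun d node => if node == key then d + 1 else d) d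
        else d) d
      = d + (l.map (fun key2 => if key = key2 then 0
            else (((PySem.Dict.mk graph).getD key2 []).count key : Int))).sum := by
  induction l generalizing d with
  | nil => simp
  | cons k2 l ih =>
    rw [List.foldl_cons, ih]
    by_cases h : k2 = key
    · subst h; simp
    · have h' : ¬ key = k2 := fun hh => h hh.symm
      rw [if_pos (by simp [h]), PySem.List.foldl_beq_add_one]
      simp [h']; ring

-- ===== VERDICT (by name: the statement is the Claim_ definition above) =====
theorem non1to1_spec : Claim_equal_non1to1 := by
  intro graph _ hpre
  show non1to1 graph = non1to1_alt graph
  have hrepr : graph = (graph.map Prod.fst).map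
      (fun k => (k, (PySem.Dict.mk graph).getD k [])) := by
    have := PySem.Dict.items_eq_map_keys (PySem.Dict.mk graph) (by simpa using hpre) ([] : List String)
    simpa using this
  simp only [non1to1, non1to1_alt]
  rw [PySem.List.foldl_append_if_eq_filter]
  conv_rhs => rw [hrepr]
  rw [List.filter_map, List.map_map]
  simp only [List.nil_append]
  rw [List.filter_map, List.map_map]
  apply congrArg
  apply List.filter_congr
  intro x hx
  simp only [Function.comp_apply]
  rw [cntA_eq, indeg_outer]
  simp [Function.comp_def]
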